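-- pv_equiv track=rewrite | github.com/Fabricio-Jose/Seguridad | lab2/lab2_unicode8230.py | reemplazar_unicode8230
-- ===== SOURCE A (Python) =====
-- def reemplazar_unicode8230(cadena):
--     # Crear un diccionario de reemplazo UNICODE-8230
--     reemplazo_unicode8230 = {
--         'A': '\u2022', 'B': '\u2020', 'C': '\u2021', 'E': '\u2026',
--         'H': '\u2030', 'I': '\u2032', 'J': '\u2033', 'K': '\u2035',
--         'M': '\u203B', 'O': '\u203E', 'P': '\u203F', 'T': '\u2044',
--         'X': '\u204A', 'Y': '\u204E',
--     }
--
--     # Realizar el reemplazo UNICODE-8230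
--     for letra, reemplazo in reemplazo_unicode8230.items():
--         cadena = cadena.replace(letra, reemplazo)
--
--     return cadena
-- ===== SOURCE B (Python) =====
-- def reemplazar_unicode8230(cadena):
--     # Same replacement table, but the result is built in a single pass over
--     # the string with a dict lookup per character instead of 14 sequential
--     # full-string .replace passes.
--     reemplazo_unicode8230 = {
--         'A': '\u2022', 'B': '\u2020', 'C': '\u2021', 'E': '\u2026',
--         'H': '\u2030', 'I': '\u2032', 'J': '\u2033', 'K': '\u2035',
--         'M': '\u203B', 'O': '\u203E', 'P': '\u203F', 'T': '\u2044',
--         'X': '\u204A', 'Y': '\u204E',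
--     }
--     return ''.join(reemplazo_unicode8230.get(c, c) for c in cadena)
-- ===== Notes on version B (the rewrite author's own statement) =====
-- stated objective: idiomatic
-- what changed: Instead of 14 sequential full-string .replace passes, B builds the result in a single traversal of the string, substituting each character via one dict lookup.
import Mathlib
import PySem

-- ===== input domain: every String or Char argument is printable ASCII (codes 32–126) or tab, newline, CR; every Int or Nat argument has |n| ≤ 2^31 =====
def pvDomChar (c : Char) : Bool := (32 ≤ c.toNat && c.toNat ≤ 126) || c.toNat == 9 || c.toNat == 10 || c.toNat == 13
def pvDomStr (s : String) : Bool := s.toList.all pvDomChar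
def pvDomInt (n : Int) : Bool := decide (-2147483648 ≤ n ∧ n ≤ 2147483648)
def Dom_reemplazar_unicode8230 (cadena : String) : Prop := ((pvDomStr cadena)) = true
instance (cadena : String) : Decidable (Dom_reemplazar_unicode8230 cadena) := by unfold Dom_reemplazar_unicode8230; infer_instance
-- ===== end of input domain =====

-- B replaces A's 14 sequential full-string .replace passes by one traversal
-- with a per-character dict lookup (objective: idiomatic single pass).

-- ===== PORT A =====
-- the Python dict literal, insertion order
def tablaA : PySem.Dict String String := PySem.Dict.mk
  [("A", "\u2022"), ("B", "\u2020"), ("C", "\u2021"), ("E", "\u2026"),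
   ("H", "\u2030"), ("I", "\u2032"), ("J", "\u2033"), ("K", "\u2035"),
   ("M", "\u203B"), ("O", "\u203E"), ("P", "\u203F"), ("T", "\u2044"),
   ("X", "\u204A"), ("Y", "\u204E")]

def reemplazar_unicode8230 (cadena : String) : String :=
  -- for letra, reemplazo in reemplazo_unicode8230.items(): cadena = cadena.replace(letra, reemplazo)
  (PySem.Dict.items tablaA).foldl (fun s p => PySem.Str.replace s p.1 p.2) cadena

-- ===== PORT B =====
-- the same dict; in Python its keys/values are 1-char strings, here Char
def tablaB : PySem.Dict Char Char := PySem.Dict.mk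
  [('A', '\u2022'), ('B', '\u2020'), ('C', '\u2021'), ('E', '\u2026'),
   ('H', '\u2030'), ('I', '\u2032'), ('J', '\u2033'), ('K', '\u2035'),
   ('M', '\u203B'), ('O', '\u203E'), ('P', '\u203F'), ('T', '\u2044'),
   ('X', '\u204A'), ('Y', '\u204E')]

def reemplazar_unicode8230_alt (cadena : String) : String :=
  -- ''.join(d.get(c, c) for c in cadena): a ''-join of one-char lookups is
  -- exactly String.ofList of the per-character map
  String.ofList (cadena.toList.map (fun c => PySem.Dict.getD tablaB c c))

-- ===== PRECONDITION & SPEC =====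
def Spec_reemplazar_unicode8230 (cadena : String) (out : String) : Prop := out = reemplazar_unicode8230_alt cadena
instance (cadena : String) (out : String) : Decidable (Spec_reemplazar_unicode8230 cadena out) := by unfold Spec_reemplazar_unicode8230; infer_instance

-- ===== CLAIM (what is proved, stated in full; the proofs are below) =====
def Claim_equal_reemplazar_unicode8230 : Prop := ∀ (cadena : String), Dom_reemplazar_unicode8230 cadena → Spec_reemplazar_unicode8230 cadena (reemplazar_unicode8230 cadena)

-- ===== LEMMAS AND PROOFS =====

-- replacing a single character by a single character is a per-character map
theorem replace_go_single (a b : Char) (l acc : List Char) (fuel : Nat)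
    (h : l.length ≤ fuel) :
    PySem.Chars.replace.go [a] [b] fuel l acc
      = acc.reverse ++ l.map (fun c => if c = a then b else c) := by
  induction l generalizing fuel acc with
  | nil => cases fuel <;> simp [PySem.Chars.replace.go]
  | cons c t ih =>
    cases fuel with
    | zero => simp at h
    | succ fuel =>
      simp only [List.length_cons, Nat.succ_le_succ_iff] at h
      by_cases hc : c = a
      · subst hc
        have hpre : [c].isPrefixOf (c :: t) = true := by simp [List.isPrefixOf]
        simp [PySem.Chars.replace.go, hpre, ih (b :: acc) fuel h]
      · have hpre : [a].isPrefixOf (c :: t) = false := by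
          simp [List.isPrefixOf]; exact fun h' => hc h'.symm
        simp [PySem.Chars.replace.go, hpre, ih (c :: acc) fuel h, hc]

theorem replace_single (a b : Char) (l : List Char) :
    PySem.Chars.replace l [a] [b] = l.map (fun c => if c = a then b else c) := by
  simp [PySem.Chars.replace, replace_go_single a b l [] l.length (le_refl _)]

theorem str_rep (a b : Char) (old new : String) (s : String)
    (h1 : old.toList = [a]) (h2 : new.toList = [b]) :
    PySem.Str.replace s old new
      = String.ofList (s.toList.map (fun c => if c = a then b else c)) := by
  simp [PySem.Str.replace, h1, h2, replace_single]

-- ===== VERDICT (by name: the statement is the Claim_ definition above) =====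
theorem reemplazar_unicode8230_spec : Claim_equal_reemplazar_unicode8230 := by
  intro cadena _
  unfold Spec_reemplazar_unicode8230 reemplazar_unicode8230 reemplazar_unicode8230_alt
  simp only [tablaA, List.foldl]
  rw [str_rep 'A' '\u2022' "A" "\u2022" _ rfl rfl, str_rep 'B' '\u2020' "B" "\u2020" _ rfl rfl,
      str_rep 'C' '\u2021' "C" "\u2021" _ rfl rfl, str_rep 'E' '\u2026' "E" "\u2026" _ rfl rfl,
      str_rep 'H' '\u2030' "H" "\u2030" _ rfl rfl, str_rep 'I' '\u2032' "I" "\u2032" _ rfl rfl,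
      str_rep 'J' '\u2033' "J" "\u2033" _ rfl rfl, str_rep 'K' '\u2035' "K" "\u2035" _ rfl rfl,
      str_rep 'M' '\u203B' "M" "\u203B" _ rfl rfl, str_rep 'O' '\u203E' "O" "\u203E" _ rfl rfl,
      str_rep 'P' '\u203F' "P" "\u203F" _ rfl rfl, str_rep 'T' '\u2044' "T" "\u2044" _ rfl rfl,
      str_rep 'X' '\u204A' "X" "\u204A" _ rfl rfl, str_rep 'Y' '\u204E' "Y" "\u204E" _ rfl rfl]
  simp only [String.toList_ofList, List.map_map]
  apply congrArg String.ofList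
  apply List.map_congr_left
  intro c _
  by_cases hA : c = 'A'
  · subst hA; decide
  by_cases hB : c = 'B'
  · subst hB; decide
  by_cases hC : c = 'C'
  · subst hC; decide
  by_cases hE : c = 'E'
  · subst hE; decide
  by_cases hH : c = 'H'
  · subst hH; decide
  by_cases hI : c = 'I'
  · subst hI; decide
  by_cases hJ : c = 'J'
  · subst hJ; decide
  by_cases hK : c = 'K'
  · subst hK; decide
  by_cases hM : c = 'M'
  · subst hM; decide
  by_cases hO : c = 'O'
  · subst hO; decide
  by_cases hP : c = 'P'
  · subst hP; decide
  by_cases hT : c = 'T'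
  · subst hT; decide
  by_cases hX : c = 'X'
  · subst hX; decide
  by_cases hY : c = 'Y'
  · subst hY; decide
  simp [Function.comp, tablaB, PySem.Dict.getD, PySem.Dict.get?, beq_iff_eq, hA, hB, hC, hE, hH, hI, hJ, hK, hM, hO, hP, hT, hX, hY, Ne.symm]
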